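-- pv_equiv track=rewrite | github.com/charliegleason/brmesh-osc | fastcon-mqtt.py | whitening_encode
-- ===== SOURCE A (Python) =====
-- def whitening_encode(data, ctx):
--     result = list(data)
--     for i in range(len(result)):
--         varC = ctx[3]
--         var14 = ctx[5]
--         var18 = ctx[6]
--         var10 = ctx[4]
--         var8 = var14 ^ ctx[2]
--         var4 = var10 ^ ctx[1]
--         _var = var18 ^ varC
--         var0 = _var ^ ctx[0]
--
--         c = result[i]
--         result[i] = ((c & 0x80) ^ ((var8 ^ var18) << 7)) & 0xFF
--         result[i] += ((c & 0x40) ^ (var0 << 6)) & 0xFF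
--         result[i] += ((c & 0x20) ^ (var4 << 5)) & 0xFF
--         result[i] += ((c & 0x10) ^ (var8 << 4)) & 0xFF
--         result[i] += ((c & 0x08) ^ (_var << 3)) & 0xFF
--         result[i] += ((c & 0x04) ^ (var10 << 2)) & 0xFF
--         result[i] += ((c & 0x02) ^ (var14 << 1)) & 0xFF
--         result[i] += ((c & 0x01) ^ (var18 << 0)) & 0xFF
--
--         ctx[2] = var4
--         ctx[3] = var8
--         ctx[4] = var8 ^ varC
--         ctx[5] = var0 ^ var10
--         ctx[6] = var4 ^ var14
--         ctx[0] = var8 ^ var18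
--         ctx[1] = var0
--
--     return result
-- ===== SOURCE B (Python) =====
-- def whitening_encode(data, ctx):
--     # Keystream is data-independent: pass 1 evolves ctx and records the eight
--     # per-index operands; pass 2 combines them with the data bytes.
--     ops = []
--     for _ in range(len(data)):
--         varC = ctx[3]
--         var14 = ctx[5]
--         var18 = ctx[6]
--         var10 = ctx[4]
--         var8 = var14 ^ ctx[2]
--         var4 = var10 ^ ctx[1]
--         _var = var18 ^ varC
--         var0 = _var ^ ctx[0]
--         ops.append((var8 ^ var18, var0, var4, var8, _var, var10, var14, var18))
--         ctx[2] = var4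
--         ctx[3] = var8
--         ctx[4] = var8 ^ varC
--         ctx[5] = var0 ^ var10
--         ctx[6] = var4 ^ var14
--         ctx[0] = var8 ^ var18
--         ctx[1] = var0
--     out = []
--     for c, (o7, o6, o5, o4, o3, o2, o1, o0) in zip(data, ops):
--         b = ((c & 0x80) ^ (o7 << 7)) & 0xFF
--         b += ((c & 0x40) ^ (o6 << 6)) & 0xFF
--         b += ((c & 0x20) ^ (o5 << 5)) & 0xFF
--         b += ((c & 0x10) ^ (o4 << 4)) & 0xFF
--         b += ((c & 0x08) ^ (o3 << 3)) & 0xFF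
--         b += ((c & 0x04) ^ (o2 << 2)) & 0xFF
--         b += ((c & 0x02) ^ (o1 << 1)) & 0xFF
--         b += ((c & 0x01) ^ (o0 << 0)) & 0xFF
--         out.append(b)
--     return out
-- ===== Notes on version B (the rewrite author's own statement) =====
-- stated objective: alternative
-- what changed: B splits A's single in-place loop into two passes: it first precomputes the data-independent whitening keystream (the eight context-derived operands per index, evolving ctx once), then combines the stored operands with the data bytes in a second pass over zip(data, ops), instead of interleaving context evolution with in-place rewriting of result[i].
import Mathlib
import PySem

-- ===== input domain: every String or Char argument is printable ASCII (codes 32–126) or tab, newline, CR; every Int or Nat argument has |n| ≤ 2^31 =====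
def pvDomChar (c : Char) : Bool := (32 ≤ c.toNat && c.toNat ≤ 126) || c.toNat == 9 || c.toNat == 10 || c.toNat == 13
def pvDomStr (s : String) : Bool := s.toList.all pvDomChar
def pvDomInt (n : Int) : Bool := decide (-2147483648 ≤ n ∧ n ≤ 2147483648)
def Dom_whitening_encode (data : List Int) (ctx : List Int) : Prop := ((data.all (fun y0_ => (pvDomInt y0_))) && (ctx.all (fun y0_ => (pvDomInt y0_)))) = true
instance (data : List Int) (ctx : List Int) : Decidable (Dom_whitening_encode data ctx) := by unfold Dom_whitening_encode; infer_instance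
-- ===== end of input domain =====

-- B precomputes the data-independent whitening keystream in a first pass, then combines it with the
-- data in a second pass (alternative decomposition; return value only — both Pythons mutate ctx identically).


-- ===== PORT A =====
-- one loop over the indices, rewriting result[i] in place and evolving ctx
def whitening_encode (data : List Int) (ctx : List Int) : List Int :=
  ((PySem.List.pyRange 0 (data.length : Int) 1).foldl (fun st i =>
    let res := st.1
    let ctx := st.2
    let varC := PySem.List.pyGetD ctx 3 0
    let var14 := PySem.List.pyGetD ctx 5 0
    let var18 := PySem.List.pyGetD ctx 6 0
    let var10 := PySem.List.pyGetD ctx 4 0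
    let var8 := PySem.Int.bxor var14 (PySem.List.pyGetD ctx 2 0)
    let var4 := PySem.Int.bxor var10 (PySem.List.pyGetD ctx 1 0)
    let _var := PySem.Int.bxor var18 varC
    let var0 := PySem.Int.bxor _var (PySem.List.pyGetD ctx 0 0)
    let c := PySem.List.pyGetD res i 0
    let r := PySem.Int.band (PySem.Int.bxor (PySem.Int.band c 0x80) ((PySem.Int.bxor var8 var18) <<< (7:Nat))) 0xFF
    let r := r + PySem.Int.band (PySem.Int.bxor (PySem.Int.band c 0x40) (var0 <<< (6:Nat))) 0xFF
    let r := r + PySem.Int.band (PySem.Int.bxor (PySem.Int.band c 0x20) (var4 <<< (5:Nat))) 0xFF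
    let r := r + PySem.Int.band (PySem.Int.bxor (PySem.Int.band c 0x10) (var8 <<< (4:Nat))) 0xFF
    let r := r + PySem.Int.band (PySem.Int.bxor (PySem.Int.band c 0x08) (_var <<< (3:Nat))) 0xFF
    let r := r + PySem.Int.band (PySem.Int.bxor (PySem.Int.band c 0x04) (var10 <<< (2:Nat))) 0xFF
    let r := r + PySem.Int.band (PySem.Int.bxor (PySem.Int.band c 0x02) (var14 <<< (1:Nat))) 0xFF
    let r := r + PySem.Int.band (PySem.Int.bxor (PySem.Int.band c 0x01) (var18 <<< (0:Nat))) 0xFF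
    let res := PySem.List.pySetD res i r
    let ctx := PySem.List.pySetD ctx 2 var4
    let ctx := PySem.List.pySetD ctx 3 var8
    let ctx := PySem.List.pySetD ctx 4 (PySem.Int.bxor var8 varC)
    let ctx := PySem.List.pySetD ctx 5 (PySem.Int.bxor var0 var10)
    let ctx := PySem.List.pySetD ctx 6 (PySem.Int.bxor var4 var14)
    let ctx := PySem.List.pySetD ctx 0 (PySem.Int.bxor var8 var18)
    let ctx := PySem.List.pySetD ctx 1 var0
    (res, ctx)) (data, ctx)).1

-- ===== PORT B =====
-- pass 1: evolve ctx, recording the eight per-index operands; pass 2: combine with the data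
def whitening_encode_alt (data : List Int) (ctx : List Int) : List Int :=
  let p := (PySem.List.pyRange 0 (data.length : Int) 1).foldl (fun st _ =>
    let ops := st.1
    let ctx := st.2
    let varC := PySem.List.pyGetD ctx 3 0
    let var14 := PySem.List.pyGetD ctx 5 0
    let var18 := PySem.List.pyGetD ctx 6 0
    let var10 := PySem.List.pyGetD ctx 4 0
    let var8 := PySem.Int.bxor var14 (PySem.List.pyGetD ctx 2 0)
    let var4 := PySem.Int.bxor var10 (PySem.List.pyGetD ctx 1 0)
    let _var := PySem.Int.bxor var18 varC
    let var0 := PySem.Int.bxor _var (PySem.List.pyGetD ctx 0 0)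
    let ops := ops ++ [(PySem.Int.bxor var8 var18, var0, var4, var8, _var, var10, var14, var18)]
    let ctx := PySem.List.pySetD ctx 2 var4
    let ctx := PySem.List.pySetD ctx 3 var8
    let ctx := PySem.List.pySetD ctx 4 (PySem.Int.bxor var8 varC)
    let ctx := PySem.List.pySetD ctx 5 (PySem.Int.bxor var0 var10)
    let ctx := PySem.List.pySetD ctx 6 (PySem.Int.bxor var4 var14)
    let ctx := PySem.List.pySetD ctx 0 (PySem.Int.bxor var8 var18)
    let ctx := PySem.List.pySetD ctx 1 var0
    (ops, ctx)) (([] : List (Int × Int × Int × Int × Int × Int × Int × Int)), ctx)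
  (data.zip p.1).foldl (fun out co =>
    let c := co.1
    let o7 : Int := co.2.1
    let o6 : Int := co.2.2.1
    let o5 : Int := co.2.2.2.1
    let o4 : Int := co.2.2.2.2.1
    let o3 : Int := co.2.2.2.2.2.1
    let o2 : Int := co.2.2.2.2.2.2.1
    let o0 : Int := co.2.2.2.2.2.2.2.2
    let o1 : Int := co.2.2.2.2.2.2.2.1
    let b := PySem.Int.band (PySem.Int.bxor (PySem.Int.band c 0x80) (o7 <<< (7:Nat))) 0xFF
    let b := b + PySem.Int.band (PySem.Int.bxor (PySem.Int.band c 0x40) (o6 <<< (6:Nat))) 0xFF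
    let b := b + PySem.Int.band (PySem.Int.bxor (PySem.Int.band c 0x20) (o5 <<< (5:Nat))) 0xFF
    let b := b + PySem.Int.band (PySem.Int.bxor (PySem.Int.band c 0x10) (o4 <<< (4:Nat))) 0xFF
    let b := b + PySem.Int.band (PySem.Int.bxor (PySem.Int.band c 0x08) (o3 <<< (3:Nat))) 0xFF
    let b := b + PySem.Int.band (PySem.Int.bxor (PySem.Int.band c 0x04) (o2 <<< (2:Nat))) 0xFF
    let b := b + PySem.Int.band (PySem.Int.bxor (PySem.Int.band c 0x02) (o1 <<< (1:Nat))) 0xFF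
    let b := b + PySem.Int.band (PySem.Int.bxor (PySem.Int.band c 0x01) (o0 <<< (0:Nat))) 0xFF
    out ++ [b]) ([] : List Int)

-- ===== PRECONDITION & SPEC =====
-- Pre_ excludes exactly the inputs where Python raises IndexError (ctx shorter than 7 with nonempty data).
def Pre_whitening_encode (data : List Int) (ctx : List Int) : Prop := data = [] ∨ 7 ≤ ctx.length
instance (data : List Int) (ctx : List Int) : Decidable (Pre_whitening_encode data ctx) := by unfold Pre_whitening_encode; infer_instance
def pvWitness_whitening_encode : List Int × List Int := ([1, 2, 255], [0, 1, 1, 0, 0, 1, 0])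

def Spec_whitening_encode (data : List Int) (ctx : List Int) (out : List Int) : Prop := out = whitening_encode_alt data ctx
instance (data : List Int) (ctx : List Int) (out : List Int) : Decidable (Spec_whitening_encode data ctx out) := by unfold Spec_whitening_encode; infer_instance

-- ===== CLAIM (what is proved, stated in full; the proofs are below) =====
def Claim_equal_whitening_encode : Prop := ∀ (data : List Int) (ctx : List Int), Dom_whitening_encode data ctx → Pre_whitening_encode data ctx → Spec_whitening_encode data ctx (whitening_encode data ctx)

-- ===== LEMMAS AND PROOFS =====

-- proof-side vocabulary: the per-step operand tuple, the byte formula, and the ctx evolution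
def pvOp (ctx : List Int) : Int × Int × Int × Int × Int × Int × Int × Int :=
  let varC := PySem.List.pyGetD ctx 3 0
  let var14 := PySem.List.pyGetD ctx 5 0
  let var18 := PySem.List.pyGetD ctx 6 0
  let var10 := PySem.List.pyGetD ctx 4 0
  let var8 := PySem.Int.bxor var14 (PySem.List.pyGetD ctx 2 0)
  let var4 := PySem.Int.bxor var10 (PySem.List.pyGetD ctx 1 0)
  let _var := PySem.Int.bxor var18 varC
  let var0 := PySem.Int.bxor _var (PySem.List.pyGetD ctx 0 0)
  (PySem.Int.bxor var8 var18, var0, var4, var8, _var, var10, var14, var18)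

def pvByte (c : Int) (o : Int × Int × Int × Int × Int × Int × Int × Int) : Int :=
  PySem.Int.band (PySem.Int.bxor (PySem.Int.band c 0x80) (o.1 <<< (7:Nat))) 0xFF
  + PySem.Int.band (PySem.Int.bxor (PySem.Int.band c 0x40) (o.2.1 <<< (6:Nat))) 0xFF
  + PySem.Int.band (PySem.Int.bxor (PySem.Int.band c 0x20) (o.2.2.1 <<< (5:Nat))) 0xFF
  + PySem.Int.band (PySem.Int.bxor (PySem.Int.band c 0x10) (o.2.2.2.1 <<< (4:Nat))) 0xFF
  + PySem.Int.band (PySem.Int.bxor (PySem.Int.band c 0x08) (o.2.2.2.2.1 <<< (3:Nat))) 0xFF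
  + PySem.Int.band (PySem.Int.bxor (PySem.Int.band c 0x04) (o.2.2.2.2.2.1 <<< (2:Nat))) 0xFF
  + PySem.Int.band (PySem.Int.bxor (PySem.Int.band c 0x02) (o.2.2.2.2.2.2.1 <<< (1:Nat))) 0xFF
  + PySem.Int.band (PySem.Int.bxor (PySem.Int.band c 0x01) (o.2.2.2.2.2.2.2 <<< (0:Nat))) 0xFF

def pvCtxStep (ctx : List Int) : List Int :=
  let varC := PySem.List.pyGetD ctx 3 0
  let var14 := PySem.List.pyGetD ctx 5 0
  let var18 := PySem.List.pyGetD ctx 6 0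
  let var10 := PySem.List.pyGetD ctx 4 0
  let var8 := PySem.Int.bxor var14 (PySem.List.pyGetD ctx 2 0)
  let var4 := PySem.Int.bxor var10 (PySem.List.pyGetD ctx 1 0)
  let _var := PySem.Int.bxor var18 varC
  let var0 := PySem.Int.bxor _var (PySem.List.pyGetD ctx 0 0)
  let ctx := PySem.List.pySetD ctx 2 var4
  let ctx := PySem.List.pySetD ctx 3 var8
  let ctx := PySem.List.pySetD ctx 4 (PySem.Int.bxor var8 varC)
  let ctx := PySem.List.pySetD ctx 5 (PySem.Int.bxor var0 var10)
  let ctx := PySem.List.pySetD ctx 6 (PySem.Int.bxor var4 var14)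
  let ctx := PySem.List.pySetD ctx 0 (PySem.Int.bxor var8 var18)
  PySem.List.pySetD ctx 1 var0

def pvEnc : List Int → List Int → List Int
  | [], _ => []
  | c :: cs, ctx => pvByte c (pvOp ctx) :: pvEnc cs (pvCtxStep ctx)

def pvCtxIter : Nat → List Int → List Int
  | 0, ctx => ctx
  | n+1, ctx => pvCtxIter n (pvCtxStep ctx)

def pvOps : Nat → List Int → List (Int × Int × Int × Int × Int × Int × Int × Int)
  | 0, _ => []
  | n+1, ctx => pvOp ctx :: pvOps n (pvCtxStep ctx)

-- the loop bodies of the two ports, named for the proofs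
def pvStepA (st : List Int × List Int) (i : Int) : List Int × List Int :=
  (PySem.List.pySetD st.1 i (pvByte (PySem.List.pyGetD st.1 i 0) (pvOp st.2)), pvCtxStep st.2)

def pvStepB (st : List (Int × Int × Int × Int × Int × Int × Int × Int) × List Int) (_ : Int) :
    List (Int × Int × Int × Int × Int × Int × Int × Int) × List Int :=
  (st.1 ++ [pvOp st.2], pvCtxStep st.2)

lemma pvA_eq (data ctx : List Int) :
    whitening_encode data ctx
      = ((PySem.List.pyRange 0 (data.length : Int) 1).foldl pvStepA (data, ctx)).1 := rfl

lemma pvB_eq (data ctx : List Int) :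
    whitening_encode_alt data ctx
      = (data.zip ((PySem.List.pyRange 0 (data.length : Int) 1).foldl pvStepB ([], ctx)).1).foldl
          (fun out co => out ++ [pvByte co.1 co.2]) [] := rfl

lemma pvStepA_mid (done cs ctx : List Int) (c : Int) :
    pvStepA (done ++ c :: cs, ctx) (done.length : Int)
      = (done ++ pvByte c (pvOp ctx) :: cs, pvCtxStep ctx) := by
  simp [pvStepA, List.getD_eq_getElem?_getD]

lemma pvLoopA (todo : List Int) : ∀ (done ctx : List Int),
    (PySem.List.pyRange (done.length : Int) ((done.length : Int) + (todo.length : Int)) 1).foldl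
        pvStepA (done ++ todo, ctx)
      = (done ++ pvEnc todo ctx, pvCtxIter todo.length ctx) := by
  induction todo with
  | nil => intro done ctx; simp [PySem.List.pyRange_one_eq_nil, pvEnc, pvCtxIter]
  | cons c cs ih =>
    intro done ctx
    rw [PySem.List.pyRange_one_cons (by push_cast [List.length_cons]; omega)]
    rw [List.foldl_cons, pvStepA_mid]
    have h1 : (done.length : Int) + 1 = (((done ++ [pvByte c (pvOp ctx)]).length : Nat) : Int) := by
      simp
    have h2 : (done.length : Int) + ((c :: cs).length : Int)
        = (((done ++ [pvByte c (pvOp ctx)]).length : Nat) : Int) + (cs.length : Int) := by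
      simp; omega
    rw [show done ++ pvByte c (pvOp ctx) :: cs = (done ++ [pvByte c (pvOp ctx)]) ++ cs by simp]
    rw [h1, h2, ih]
    simp [pvEnc, pvCtxIter]

lemma pvLoopB (n : Nat) : ∀ (a : Int) (ops : List (Int × Int × Int × Int × Int × Int × Int × Int)) (ctx : List Int),
    (PySem.List.pyRange a (a + (n : Int)) 1).foldl pvStepB (ops, ctx)
      = (ops ++ pvOps n ctx, pvCtxIter n ctx) := by
  induction n with
  | zero => intro a ops ctx; simp [PySem.List.pyRange_one_eq_nil, pvOps, pvCtxIter]
  | succ k ih =>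
    intro a ops ctx
    rw [PySem.List.pyRange_one_cons (by omega)]
    rw [List.foldl_cons]
    show (PySem.List.pyRange (a + 1) (a + (↑k + 1)) 1).foldl pvStepB (ops ++ [pvOp ctx], pvCtxStep ctx) = _
    rw [show a + ((k : Int) + 1) = (a + 1) + (k : Int) by omega, ih]
    simp [pvOps, pvCtxIter]

lemma pvZipMap (data : List Int) : ∀ ctx : List Int,
    (data.zip (pvOps data.length ctx)).map (fun co => pvByte co.1 co.2) = pvEnc data ctx := by
  induction data with
  | nil => intro ctx; simp [pvEnc]
  | cons c cs ih => intro ctx; simp [pvOps, pvEnc, ih]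

-- ===== VERDICT (by name: the statement is the Claim_ definition above) =====
theorem whitening_encode_spec : Claim_equal_whitening_encode := by
  intro data ctx _ _
  unfold Spec_whitening_encode
  rw [pvA_eq, pvB_eq]
  have hA := pvLoopA data [] ctx
  simp only [List.length_nil, List.nil_append, Nat.cast_zero, Int.zero_add] at hA
  rw [hA]
  have hB := pvLoopB data.length 0 [] ctx
  simp only [List.nil_append, Int.zero_add] at hB
  rw [hB]
  rw [PySem.List.foldl_append_singleton_eq_map]
  simp [pvZipMap]
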